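-- pv_equiv track=rewrite | github.com/silvercent011/g3niusPy | func/login.py | descriptografaTexto
-- ===== SOURCE A (Python) =====
-- def descriptografaTexto(texto):
--     '''
--     Função recebe uma string criptogradafa e retorna legível
--     '''
--     final = ''
--     d = 1079
--     n = 1073
--     for x in texto:
--         codigoOrd = ord(x)
--         cripto = chr(codigoOrd**d%n)
--         final+=cripto
--
--     return final
-- ===== SOURCE B (Python) =====
-- _N = 1073  # = 29 * 37, squarefree; Carmichael's lambda(1073) = lcm(28, 36) = 252 and
-- # 1079 = 71 + 4*252, so x**1079 % 1073 == x**71 % 1073 for every integer x >= 0.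
--
-- def _build_table():
--     # one fixed 128-entry table (the input domain is ASCII), each entry computed
--     # by 71 modular multiplications instead of a 1079-th big-integer power
--     table = []
--     for i in range(128):
--         acc = 1
--         for _ in range(71):
--             acc = acc * i % _N
--         table.append(chr(acc))
--     return table
--
-- _TABLE = _build_table()
--
-- def descriptografaTexto(texto):
--     '''
--     Função recebe uma string criptogradafa e retorna legível
--     '''
--     return ''.join([_TABLE[ord(x)] for x in texto])
-- ===== Notes on version B (the rewrite author's own statement) =====
-- stated objective: faster
-- what changed: B replaces the per-character 1079-th big-integer power with a fixed 128-entry ASCII lookup table built once at module load (each entry by 71 modular multiplications, valid because 1079 ≡ 71 mod Carmichael-lambda(1073)=252 and 1073 is squarefree), so decryption is pure table indexing joined in one comprehension.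
import Mathlib
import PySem

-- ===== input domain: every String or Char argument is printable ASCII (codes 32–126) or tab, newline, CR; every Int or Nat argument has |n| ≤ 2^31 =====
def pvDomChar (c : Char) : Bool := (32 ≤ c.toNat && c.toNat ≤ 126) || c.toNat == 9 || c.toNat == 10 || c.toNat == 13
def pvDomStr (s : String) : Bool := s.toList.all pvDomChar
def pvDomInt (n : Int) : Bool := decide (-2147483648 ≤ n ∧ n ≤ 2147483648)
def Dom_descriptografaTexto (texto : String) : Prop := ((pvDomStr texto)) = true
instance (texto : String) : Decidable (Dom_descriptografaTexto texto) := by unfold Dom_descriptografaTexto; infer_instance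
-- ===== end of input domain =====

-- B replaces A's per-character 1079-th big-integer power with one fixed 128-entry ASCII
-- lookup table (each entry built by 71 modular multiplications; 1079 ≡ 71 mod λ(1073)=252
-- and 1073 = 29·37 is squarefree) and a single table-indexing pass (objective: faster).

-- ===== PORT A =====
-- Literal port of A: accumulate chr(ord(x)**1079 % 1073) character by character.
-- ord/chr are Char.toNat/Char.ofNat; '**' and '%' on non-negative ints are Nat ^ and %.
def descriptografaTexto (texto : String) : String :=
  String.ofList (texto.toList.foldl
    (fun final x =>
      let codigoOrd := x.toNat
      let cripto := Char.ofNat (codigoOrd ^ 1079 % 1073)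
      final ++ [cripto]) [])

-- ===== PORT B =====
-- Literal port of B's _build_table(): for i in range(128), acc starts at 1 and is
-- multiplied-and-reduced 71 times (all values are non-negative Nats, where Python's
-- '*' and '%' coincide with Nat.mul/Nat.mod), then chr(acc) is appended.
def pvTable : List Char :=
  (List.range 128).foldl (fun table i =>
    let acc := (List.range 71).foldl (fun acc _ => acc * i % 1073) 1
    table ++ [Char.ofNat acc]) []

-- Literal port of B: _TABLE[ord(x)] for each char, joined.  On the stated domain every
-- ordinal is < 128; out of range Python raises IndexError (outside Dom, nothing is
-- claimed) and the port defaults to the character itself.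
def descriptografaTexto_alt (texto : String) : String :=
  String.ofList (texto.toList.map (fun x => pvTable.getD x.toNat x))

-- ===== PRECONDITION & SPEC =====
def Spec_descriptografaTexto (texto : String) (out : String) : Prop := out = descriptografaTexto_alt texto
instance (texto : String) (out : String) : Decidable (Spec_descriptografaTexto texto out) := by unfold Spec_descriptografaTexto; infer_instance

-- ===== CLAIM (what is proved, stated in full; the proofs are below) =====
def Claim_equal_descriptografaTexto : Prop := ∀ (texto : String), Dom_descriptografaTexto texto → Spec_descriptografaTexto texto (descriptografaTexto texto)

-- ===== LEMMAS AND PROOFS =====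

-- A's accumulation loop builds the map of the list.
theorem pv_foldl_append (l : List Char) (acc : List Char) :
    l.foldl (fun final x =>
      let codigoOrd := x.toNat
      let cripto := Char.ofNat (codigoOrd ^ 1079 % 1073)
      final ++ [cripto]) acc
    = acc ++ l.map (fun x => Char.ofNat (x.toNat ^ 1079 % 1073)) := by
  induction l generalizing acc with
  | nil => simp
  | cons x s ih => simp [List.foldl, ih]

-- The table entry for every in-domain ordinal is exactly A's modular power
-- (this closed computation absorbs the Carmichael exponent reduction 1079 → 71).
set_option maxRecDepth 4096 in
theorem pv_table_get : ∀ n, n < 128 → pvTable[n]? = some (Char.ofNat (n ^ 1079 % 1073)) := by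
  decide

theorem pv_dom_lt (c : Char) (h : pvDomChar c = true) : c.toNat < 128 := by
  simp [pvDomChar] at h
  omega

-- ===== VERDICT (by name: the statement is the Claim_ definition above) =====
set_option maxRecDepth 8192 in
theorem descriptografaTexto_spec : Claim_equal_descriptografaTexto := by
  intro texto hdom
  unfold Spec_descriptografaTexto descriptografaTexto descriptografaTexto_alt
  rw [pv_foldl_append]
  simp only [List.nil_append]
  congr 1
  apply List.map_congr_left
  intro x hx
  have hd : pvDomChar x = true := by
    have := hdom
    unfold Dom_descriptografaTexto pvDomStr at this
    exact (List.all_eq_true.mp this) x hx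
  rw [List.getD_eq_getElem?_getD, pv_table_get x.toNat (pv_dom_lt x hd)]
  rfl
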